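-- pv_equiv track=rewrite | github.com/tiameister/Omni-ML-GUI | evaluation/plots/feature_importance.py | _raw_feature_from_transformed
-- ===== SOURCE A (Python) =====
-- def _strip_pipeline_prefix(name: str) -> str:
--     txt = str(name)
--     for prefix in ("num__", "cat__", "ord__", "bin__"):
--         if txt.startswith(prefix):
--             return txt[len(prefix):]
--     return txt
--
-- def _raw_feature_from_transformed(transformed_name: str, raw_columns_sorted: list[str]) -> str:
--     name = _strip_pipeline_prefix(transformed_name)
--     if name in raw_columns_sorted:
--         return name
--     for raw in raw_columns_sorted:
--         if name.startswith(f"{raw}_"):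
--             return raw
--     return name
-- ===== SOURCE B (Python) =====
-- def _strip_pipeline_prefix(name: str) -> str:
--     txt = str(name)
--     for prefix in ("num__", "cat__", "ord__", "bin__"):
--         if txt.startswith(prefix):
--             return txt[len(prefix):]
--     return txt
--
-- def _raw_feature_from_transformed(transformed_name: str, raw_columns_sorted: list[str]) -> str:
--     name = _strip_pipeline_prefix(transformed_name)
--     # one pass over the columns: map each column to its first position
--     first_idx = {}
--     for i, col in enumerate(raw_columns_sorted):
--         if col not in first_idx:
--             first_idx[col] = i
--     if name in first_idx:
--         return name
--     # walk the name's underscore positions and pick the candidate prefix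
--     # whose first occurrence in the column list is earliest
--     best = None
--     for k, ch in enumerate(name):
--         if ch == '_':
--             j = first_idx.get(name[:k])
--             if j is not None and (best is None or j < best[0]):
--                 best = (j, name[:k])
--     return best[1] if best is not None else name
-- ===== Notes on version B (the rewrite author's own statement) =====
-- stated objective: alternative
-- what changed: Instead of scanning every raw column with startswith, B builds a column->first-position map in one pass and walks the name's underscore positions, picking the candidate prefix whose first occurrence in the column list is earliest.
import Mathlib
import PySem

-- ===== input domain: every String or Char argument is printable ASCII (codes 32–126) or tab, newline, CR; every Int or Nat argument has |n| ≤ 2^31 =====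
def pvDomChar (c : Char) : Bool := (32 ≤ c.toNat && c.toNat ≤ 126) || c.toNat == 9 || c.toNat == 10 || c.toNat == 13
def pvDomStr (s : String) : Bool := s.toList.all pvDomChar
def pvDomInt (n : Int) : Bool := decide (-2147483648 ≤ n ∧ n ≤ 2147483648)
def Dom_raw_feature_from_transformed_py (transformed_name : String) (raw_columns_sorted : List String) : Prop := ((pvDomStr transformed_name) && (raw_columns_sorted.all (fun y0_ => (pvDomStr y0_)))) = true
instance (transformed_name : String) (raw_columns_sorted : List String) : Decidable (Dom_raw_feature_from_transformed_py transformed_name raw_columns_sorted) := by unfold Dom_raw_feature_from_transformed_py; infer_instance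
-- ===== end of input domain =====

-- B replaces A's per-column startswith scan by a single first-index map over the
-- columns plus a walk over the name's underscore positions (objective: alternative).

-- ===== PORT A =====
-- shared helper (identical in Source A and Source B): strip a pipeline prefix
def strip_pipeline_prefix (name : String) : String :=
  let txt := name
  match ["num__", "cat__", "ord__", "bin__"].foldl
    (fun (acc : Option String) (pfx : String) =>
      match acc with
      | some r => some r
      | none =>
        if PySem.Str.startswith txt pfx then
          some (PySem.Str.slice txt (some (pfx.length : Int)) none)
        else none) none with
  | some r => r
  | none => txt

def raw_feature_from_transformed_py (transformed_name : String) (raw_columns_sorted : List String) : String :=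
  let name := strip_pipeline_prefix transformed_name
  if name ∈ raw_columns_sorted then name
  else
    match raw_columns_sorted.find? (fun raw => PySem.Str.startswith name (raw ++ "_")) with
    | some raw => raw
    | none => name

-- ===== PORT B =====
def build_first_idx (raw_columns_sorted : List String) : PySem.Dict String Int :=
  (PySem.List.enumerate raw_columns_sorted).foldl
    (fun d p => if d.contains p.2 then d else d.insert p.2 p.1) PySem.Dict.empty

def raw_feature_from_transformed_py_alt (transformed_name : String) (raw_columns_sorted : List String) : String :=
  let name := strip_pipeline_prefix transformed_name
  let first_idx := build_first_idx raw_columns_sorted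
  if first_idx.contains name then name
  else
    let best := (PySem.List.enumerate name.toList).foldl
      (fun (best : Option (Int × String)) p =>
        if p.2 = '_' then
          match first_idx.get? (PySem.Str.slice name none (some p.1)) with
          | some j =>
            match best with
            | none => some (j, PySem.Str.slice name none (some p.1))
            | some b => if j < b.1 then some (j, PySem.Str.slice name none (some p.1)) else some b
          | none => best
        else best) none
    match best with
    | some b => b.2
    | none => name

-- ===== PRECONDITION & SPEC =====
def Spec_raw_feature_from_transformed_py (transformed_name : String) (raw_columns_sorted : List String) (out : String) : Prop := out = raw_feature_from_transformed_py_alt transformed_name raw_columns_sorted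
instance (transformed_name : String) (raw_columns_sorted : List String) (out : String) : Decidable (Spec_raw_feature_from_transformed_py transformed_name raw_columns_sorted out) := by unfold Spec_raw_feature_from_transformed_py; infer_instance

-- ===== CLAIM (what is proved, stated in full; the proofs are below) =====
def Claim_equal_raw_feature_from_transformed_py : Prop := ∀ (transformed_name : String) (raw_columns_sorted : List String), Dom_raw_feature_from_transformed_py transformed_name raw_columns_sorted → Spec_raw_feature_from_transformed_py transformed_name raw_columns_sorted (raw_feature_from_transformed_py transformed_name raw_columns_sorted)

-- ===== LEMMAS AND PROOFS =====

-- the first-index dictionary looks up the first occurrence of a column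
theorem build_aux (L : List String) : ∀ (s : Int) (d : PySem.Dict String Int) (c : String),
    ((PySem.List.enumerate L s).foldl
      (fun d p => if d.contains p.2 then d else d.insert p.2 p.1) d).get? c
    = if d.contains c then d.get? c
      else (PySem.List.index? L c).map (fun n => (n : Int) + s) := by
  induction L with
  | nil =>
    intro s d c
    simp [PySem.List.enumerate_nil, PySem.List.index?_eq_idxOf?]
    intro h
    rwa [PySem.Dict.get?_eq_none_iff_contains]
  | cons x xs ih =>
    intro s d c
    rw [PySem.List.enumerate_cons]
    simp only [List.foldl_cons, ih]
    by_cases hdc : d.contains c = true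
    · by_cases hdx : d.contains x = true
      · simp [hdx, hdc]
      · have hxc : x ≠ c := fun h => hdx (h ▸ hdc)
        simp [hdx, hdc, PySem.Dict.contains_insert,
          PySem.Dict.get?_insert_of_ne d s (Ne.symm hxc)]
    · by_cases hxc : x = c
      · subst hxc
        rw [PySem.List.index?_cons_self]
        simp [hdc, PySem.Dict.contains_insert_self, PySem.Dict.get?_insert_self]
      · have h1 : (if d.contains x = true then d else d.insert x s).contains c = false := by
          by_cases hdx : d.contains x = true
          · simp [hdx, hdc]
          · simp [hdx, PySem.Dict.contains_insert, hdc]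
            exact fun h => hxc h.symm
        rw [PySem.List.index?_cons_of_ne _ hxc]
        simp only [h1, hdc, if_false, Bool.false_eq_true]
        cases PySem.List.index? xs c with
        | none => simp
        | some n => simp; ring

theorem get?_build (L : List String) (c : String) :
    (build_first_idx L).get? c = (PySem.List.index? L c).map (fun n => (n : Int)) := by
  rw [build_first_idx, build_aux]
  simp [PySem.Dict.contains_empty]

theorem contains_build (L : List String) (c : String) :
    (build_first_idx L).contains c = decide (c ∈ L) := by
  rw [PySem.Dict.contains_eq_isSome_get?, get?_build]
  rcases h : PySem.List.index? L c with _ | n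
  · simp [(PySem.List.index?_eq_none_iff _ _).mp h]
  · simp [(PySem.List.index?_isSome_iff L c).mp (by rw [h]; rfl)]

-- the "shortest/first" candidate prefixes: s[:k] at an underscore position k
def strTake (name : String) (k : Nat) : String := PySem.Str.slice name none (some (k : Int))

theorem toList_strTake (name : String) (k : Nat) :
    (strTake name k).toList = name.toList.take k := by
  simp [strTake, PySem.Str.toList_slice, PySem.List.slice_to_natCast]

-- startswith name (c ++ "_") holds exactly for the underscore-position prefixes of name
theorem startswith_iff_strTake (name c : String) :
    PySem.Str.startswith name (c ++ "_") = true
      ↔ ∃ k : Nat, k < name.toList.length ∧ name.toList[k]? = some '_' ∧ c = strTake name k := by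
  constructor
  · intro h
    have h' : (c.toList ++ ['_']) <+: name.toList := by
      have := (PySem.Chars.startswith_iff name.toList (c ++ "_").toList).mp (by simpa using h)
      simpa using this
    obtain ⟨t, ht⟩ := h'
    refine ⟨c.toList.length, ?_, ?_, ?_⟩
    · rw [← ht]; simp
    · rw [← ht]; simp
    · apply String.ext
      rw [toList_strTake, ← ht]
      simp
  · rintro ⟨k, hk, hu, rfl⟩
    have hbr : PySem.Str.startswith name (strTake name k ++ "_")
        = PySem.Chars.startswith name.toList (strTake name k ++ "_").toList := by simp
    rw [hbr]
    apply (PySem.Chars.startswith_iff _ _).mpr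
    have htl : (strTake name k ++ "_").toList = name.toList.take k ++ ['_'] := by
      simp [toList_strTake]
    rw [htl]
    have hstep : name.toList.take (k + 1) = name.toList.take k ++ ['_'] := by
      rw [List.take_add_one, hu]; rfl
    rw [← hstep]
    exact List.take_prefix _ _

def min2 (b : Option (Int × String)) (q : Int × String) : Option (Int × String) :=
  match b with
  | none => some q
  | some b0 => if q.1 < b0.1 then some q else some b0

def candPairs (name : String) (fi : PySem.Dict String Int) : List (Int × String) :=
  (PySem.List.enumerate name.toList).filterMap
    (fun p => if p.2 = '_' then (fi.get? (PySem.Str.slice name none (some p.1))).map (fun j => (j, PySem.Str.slice name none (some p.1))) else none)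

theorem fold_eq_candPairs (name : String) (fi : PySem.Dict String Int) :
    (PySem.List.enumerate name.toList).foldl
      (fun (best : Option (Int × String)) p =>
        if p.2 = '_' then
          match fi.get? (PySem.Str.slice name none (some p.1)) with
          | some j =>
            match best with
            | none => some (j, PySem.Str.slice name none (some p.1))
            | some b => if j < b.1 then some (j, PySem.Str.slice name none (some p.1)) else some b
          | none => best
        else best) none
    = (candPairs name fi).foldl min2 none := by
  rw [candPairs, List.foldl_filterMap]
  congr 1
  funext b p
  by_cases h : p.2 = '_'
  · simp only [h, if_pos]
    cases fi.get? (PySem.Str.slice name none (some p.1)) with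
    | none => simp
    | some j => cases b <;> simp [min2]
  · simp [h]

theorem foldl_min2_some : ∀ (ps : List (Int × String)) (x : Int × String),
    ∃ r, ps.foldl min2 (some x) = some r ∧ (r ∈ ps ∨ r = x) ∧ (∀ q ∈ ps, r.1 ≤ q.1) ∧ r.1 ≤ x.1 := by
  intro ps
  induction ps with
  | nil => exact fun x => ⟨x, rfl, Or.inr rfl, by simp, le_refl _⟩
  | cons q tl ih =>
    intro x
    simp only [List.foldl_cons]
    by_cases h : q.1 < x.1
    · have hq : min2 (some x) q = some q := by simp [min2, h]
      rw [hq]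
      obtain ⟨r, h1, h2, h3, h4⟩ := ih q
      refine ⟨r, h1, ?_, ?_, le_trans h4 (le_of_lt h)⟩
      · rcases h2 with h2 | h2
        · exact Or.inl (List.mem_cons_of_mem _ h2)
        · exact Or.inl (h2 ▸ List.mem_cons_self ..)
      · intro q' hq'
        rcases List.mem_cons.mp hq' with rfl | hq'
        · exact h4
        · exact h3 _ hq'
    · have hx : min2 (some x) q = some x := by simp [min2, h]
      rw [hx]
      obtain ⟨r, h1, h2, h3, h4⟩ := ih x
      refine ⟨r, h1, ?_, ?_, h4⟩
      · rcases h2 with h2 | h2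
        · exact Or.inl (List.mem_cons_of_mem _ h2)
        · exact Or.inr h2
      · intro q' hq'
        rcases List.mem_cons.mp hq' with rfl | hq'
        · exact le_trans h4 (not_lt.mp h)
        · exact h3 _ hq' 

theorem foldl_min2_none_of_ne_nil (ps : List (Int × String)) (h : ps ≠ []) :
    ∃ r, ps.foldl min2 none = some r ∧ r ∈ ps ∧ ∀ q ∈ ps, r.1 ≤ q.1 := by
  cases ps with
  | nil => exact absurd rfl h
  | cons q tl =>
    obtain ⟨r, h1, h2, h3, h4⟩ := foldl_min2_some tl q
    refine ⟨r, by simpa [min2] using h1, ?_, ?_⟩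
    · rcases h2 with h2 | h2
      · exact List.mem_cons_of_mem _ h2
      · exact h2 ▸ List.mem_cons_self ..
    · intro q' hq'
      rcases List.mem_cons.mp hq' with rfl | hq'
      · exact h4
      · exact h3 _ hq' 

theorem mem_candPairs (name : String) (fi : PySem.Dict String Int) (q : Int × String) :
    q ∈ candPairs name fi
      ↔ ∃ k : Nat, k < name.toList.length ∧ name.toList[k]? = some '_' ∧ q.2 = strTake name k ∧ fi.get? q.2 = some q.1 := by
  constructor
  · intro hq
    obtain ⟨p, hp, he⟩ := List.mem_filterMap.mp hq
    obtain ⟨k, hk, rfl⟩ := (PySem.List.mem_enumerate_iff _ _ _).mp hp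
    by_cases h : name.toList[k] = '_'
    · rw [if_pos h] at he
      rcases hg : fi.get? (PySem.Str.slice name none (some ((0 : Int) + (k : Int)))) with _ | j
      · rw [hg] at he; simp at he
      · rw [hg] at he
        simp only [Option.map_some, Option.some.injEq] at he
        have hsl : PySem.Str.slice name none (some ((0 : Int) + (k : Int))) = strTake name k := by
          simp [strTake]
        refine ⟨k, hk, by rw [List.getElem?_eq_getElem hk, h], ?_, ?_⟩
        · rw [← he]; exact hsl
        · rw [← he]
          have hx : fi.get? (PySem.Str.slice name none (some ((0 : Int) + (k : Int)))) = some j := by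
            exact hg
          exact hx
    · rw [if_neg h] at he
      simp at he
  · rintro ⟨k, hk, hu, hq2, hg⟩
    apply List.mem_filterMap.mpr
    refine ⟨((0 : Int) + (k : Int), name.toList[k]'hk), (PySem.List.mem_enumerate_iff _ _ _).mpr ⟨k, hk, rfl⟩, ?_⟩
    have h : name.toList[k]'hk = '_' := by
      have := List.getElem?_eq_getElem (l := name.toList) hk
      rw [hu] at this
      exact (Option.some_inj.mp this).symm
    rw [if_pos h]
    have hsl : PySem.Str.slice name none (some ((0 : Int) + (k : Int))) = strTake name k := by
      simp [strTake]
    rw [hsl, ← hq2, hg]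
    rfl

-- ===== VERDICT (by name: the statement is the Claim_ definition above) =====
theorem raw_feature_from_transformed_py_spec : Claim_equal_raw_feature_from_transformed_py := by
  intro t L _
  unfold Spec_raw_feature_from_transformed_py
  unfold raw_feature_from_transformed_py raw_feature_from_transformed_py_alt
  simp only [contains_build, fold_eq_candPairs]
  set name := strip_pipeline_prefix t with hname
  by_cases hm : name ∈ L
  · simp [hm]
  · simp only [hm, decide_false, if_neg, Bool.false_eq_true, not_false_iff]
    rcases hf : L.find? (fun raw => PySem.Str.startswith name (raw ++ "_")) with _ | r
    · have hps : candPairs name (build_first_idx L) = [] := by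
        rw [List.eq_nil_iff_forall_not_mem]
        intro q hq
        obtain ⟨k, hk, hu, hq2, hg⟩ := (mem_candPairs _ _ _).mp hq
        rw [get?_build] at hg
        have hmem : q.2 ∈ L := by
          apply (PySem.List.index?_isSome_iff L q.2).mp
          rcases hj : PySem.List.index? L q.2 with _ | j
          · rw [hj] at hg; simp at hg
          · rfl
        have hP : PySem.Str.startswith name (q.2 ++ "_") = true :=
          (startswith_iff_strTake name q.2).mpr ⟨k, hk, hu, hq2⟩
        exact absurd hP (by simpa using List.find?_eq_none.mp hf q.2 hmem)
      rw [hps]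
      simp
    · obtain ⟨hPr, as, bs, hL, has⟩ := List.find?_eq_some_iff_append.mp hf
      have hrnotas : r ∉ as := by
        intro hmem
        have := has r hmem
        rw [hPr] at this
        simp at this
      have hidx : PySem.List.index? L r = some as.length :=
        (PySem.List.index?_eq_some_iff L r as.length).mpr ⟨as, bs, hL, rfl, hrnotas⟩
      have hgr : (build_first_idx L).get? r = some (as.length : Int) := by
        rw [get?_build, hidx]; rfl
      obtain ⟨k0, hk0, hu0, hr0⟩ := (startswith_iff_strTake name r).mp hPr
      have hmemps : ((as.length : Int), r) ∈ candPairs name (build_first_idx L) :=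
        (mem_candPairs _ _ _).mpr ⟨k0, hk0, hu0, hr0, hgr⟩
      have hne : candPairs name (build_first_idx L) ≠ [] := by
        intro h
        rw [h] at hmemps
        simp at hmemps
      obtain ⟨m, hfold, hmem, hmin⟩ := foldl_min2_none_of_ne_nil _ hne
      rw [hfold]
      obtain ⟨k, hk, hu, hm2, hg⟩ := (mem_candPairs _ _ _).mp hmem
      rw [get?_build] at hg
      rcases hj : PySem.List.index? L m.2 with _ | j
      · rw [hj] at hg; simp at hg
      · rw [hj] at hg
        simp at hg
        have hjle : j ≤ as.length := by
          have h1 := hmin _ hmemps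
          rw [← hg] at h1
          have h2 : (j : Int) ≤ (as.length : Int) := h1
          exact_mod_cast h2
        obtain ⟨hjlt, hLj, _⟩ := PySem.List.getElem_of_index?_eq_some hj
        have hPm : PySem.Str.startswith name (m.2 ++ "_") = true :=
          (startswith_iff_strTake name m.2).mpr ⟨k, hk, hu, hm2⟩
        by_cases hjas : j < as.length
        · exfalso
          have hLjas : L[j]'hjlt = as[j]'hjas := by
            simp only [hL]
            exact List.getElem_append_left hjas
          have hmemas : m.2 ∈ as := by
            rw [← hLj, hLjas]
            exact List.getElem_mem _
          have := has m.2 hmemas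
          rw [hPm] at this
          simp at this
        · have hjeq : j = as.length := by omega
          have hLjr : L[j]'hjlt = r := by
            subst hjeq
            simp [hL]
          show r = m.2
          rw [← hLj, hLjr]
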